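-- pv_equiv track=rewrite | github.com/brandondjango/FootballAI | src/data_processing/elevens_profiles/elevens_builder.py | group_subbed_on_players_by_minute
-- ===== SOURCE A (Python) =====
-- def group_subbed_on_players_by_minute(player_touples):
--     grouped_subs = {}
--     for player in player_touples:
--         key = player[-1]
--         if key not in grouped_subs:
--             grouped_subs[key] = []
--         grouped_subs[key].append(player)
--     return grouped_subs
-- ===== SOURCE B (Python) =====
-- def _key(p):
--     return p[-1]
--
-- def group_subbed_on_players_by_minute(player_touples):
--     # collect distinct keys in order of first appearance, then filter per key
--     keys = []
--     for p in player_touples: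
--         k = _key(p)
--         if k not in keys:
--             keys.append(k)
--     return {k: [p for p in player_touples if _key(p) == k] for k in keys}
-- ===== Notes on version B (the rewrite author's own statement) =====
-- stated objective: alternative
-- what changed: Replaces the single-pass dict-bucket mutation with a two-phase strategy: first an ordered dedup of the keys, then a dict comprehension that filters the whole input once per distinct key.
import Mathlib
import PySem

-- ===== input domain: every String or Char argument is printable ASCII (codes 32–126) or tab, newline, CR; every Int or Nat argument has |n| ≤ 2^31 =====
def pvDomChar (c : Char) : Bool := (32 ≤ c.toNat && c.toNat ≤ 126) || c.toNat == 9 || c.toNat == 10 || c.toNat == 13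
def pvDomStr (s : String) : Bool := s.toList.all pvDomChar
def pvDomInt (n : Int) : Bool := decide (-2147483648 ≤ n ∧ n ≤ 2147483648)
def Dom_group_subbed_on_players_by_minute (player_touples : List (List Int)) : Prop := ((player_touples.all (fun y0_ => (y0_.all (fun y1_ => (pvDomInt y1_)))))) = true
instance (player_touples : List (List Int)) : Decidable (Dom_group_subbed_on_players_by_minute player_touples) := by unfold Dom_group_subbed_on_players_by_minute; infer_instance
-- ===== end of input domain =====

-- B replaces A's single-pass dict-bucket mutation by an ordered key dedup followed by one filter per distinct key (alternative decomposition, same results).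


-- ===== PORT A =====
def group_subbed_on_players_by_minute (player_touples : List (List Int)) : List (Int × List (List Int)) :=
  (player_touples.foldl
    (fun (grouped_subs : PySem.Dict Int (List (List Int))) player =>
      let key := (PySem.List.pyGet? player (-1)).getD 0   -- player[-1]; Pre_ guarantees player ≠ []
      let grouped_subs :=
        if grouped_subs.contains key then grouped_subs else grouped_subs.insert key []
      grouped_subs.modify key [] (fun l => l ++ [player]))  -- grouped_subs[key].append(player)
    PySem.Dict.empty).items

-- ===== PORT B =====
def pvKey (p : List Int) : Int := (PySem.List.pyGet? p (-1)).getD 0   -- _key(p) = p[-1]; Pre_ guarantees p ≠ []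

def group_subbed_on_players_by_minute_alt (player_touples : List (List Int)) : List (Int × List (List Int)) :=
  let keys := player_touples.foldl
    (fun (ks : List Int) p => let k := pvKey p; if ks.contains k then ks else ks ++ [k]) []
  keys.map (fun k => (k, player_touples.filter (fun p => pvKey p == k)))

-- ===== PRECONDITION & SPEC =====
-- Pre_ excludes exactly the inputs on which Python A raises: an empty inner list makes player[-1] an IndexError (B raises there too).
def Pre_group_subbed_on_players_by_minute (player_touples : List (List Int)) : Prop :=
  ∀ p ∈ player_touples, p ≠ []
instance (player_touples : List (List Int)) : Decidable (Pre_group_subbed_on_players_by_minute player_touples) := by unfold Pre_group_subbed_on_players_by_minute; infer_instance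

def pvWitness_group_subbed_on_players_by_minute : List (List Int) := [[1, 5], [2, 5], [3, 7]]

def Spec_group_subbed_on_players_by_minute (player_touples : List (List Int)) (out : List (Int × List (List Int))) : Prop := out = group_subbed_on_players_by_minute_alt player_touples
instance (player_touples : List (List Int)) (out : List (Int × List (List Int))) : Decidable (Spec_group_subbed_on_players_by_minute player_touples out) := by unfold Spec_group_subbed_on_players_by_minute; infer_instance

-- ===== CLAIM (what is proved, stated in full; the proofs are below) =====
def Claim_equal_group_subbed_on_players_by_minute : Prop := ∀ (player_touples : List (List Int)), Dom_group_subbed_on_players_by_minute player_touples → Pre_group_subbed_on_players_by_minute player_touples → Spec_group_subbed_on_players_by_minute player_touples (group_subbed_on_players_by_minute player_touples)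

-- ===== LEMMAS AND PROOFS =====

-- Inserting an absent key with [] and then modifying it is the same as modifying with default [].
theorem pv_insert_modify (d : PySem.Dict Int (List (List Int))) (k : Int) (x : List Int)
    (h : d.contains k = false) :
    (d.insert k []).modify k [] (fun l => l ++ [x]) = d.modify k [] (fun l => l ++ [x]) := by
  unfold PySem.Dict.modify
  beta_reduce
  rw [PySem.Dict.getD_insert_self, PySem.Dict.getD_of_not_contains d [] h,
      PySem.Dict.insert_insert_self]

-- A's fold equals the plain modify fold.
theorem pv_foldA_eq_modify (xs : List (List Int)) (d : PySem.Dict Int (List (List Int))) :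
    xs.foldl
      (fun (g : PySem.Dict Int (List (List Int))) player =>
        let key := (PySem.List.pyGet? player (-1)).getD 0
        let g := if g.contains key then g else g.insert key []
        g.modify key [] (fun l => l ++ [player])) d
    = xs.foldl (fun g player => g.modify (pvKey player) [] (fun l => l ++ [player])) d := by
  induction xs generalizing d with
  | nil => rfl
  | cons p xs ih =>
    simp only [List.foldl_cons]
    rw [← ih]
    congr 1
    by_cases h : d.contains (pvKey p)
    · unfold pvKey at h; simp [h, pvKey]
    · unfold pvKey at h
      simp only [Bool.not_eq_true] at h
      simp [h, pv_insert_modify _ _ _ h, pvKey]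

-- B's ordered key dedup is PySem.Set.ofList of the mapped keys.
theorem pv_keys_fold (xs : List (List Int)) :
    xs.foldl (fun (ks : List Int) p => let k := pvKey p; if ks.contains k then ks else ks ++ [k]) []
    = PySem.Set.ofList (xs.map pvKey) := by
  rw [← PySem.Set.update_nil_left, PySem.Set.update_map_eq_foldl_add]
  rfl

-- value of the modify-fold dict at any key: the matching players, in order.
theorem pv_getD_fold (xs : List (List Int)) (k : Int) :
    (xs.foldl (fun (g : PySem.Dict Int (List (List Int))) p => g.modify (pvKey p) [] (fun l => l ++ [p]))
      PySem.Dict.empty).getD k []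
    = xs.filter (fun p => pvKey p == k) := by
  rw [show (xs.foldl (fun (g : PySem.Dict Int (List (List Int))) p => g.modify (pvKey p) [] (fun l => l ++ [p])) PySem.Dict.empty)
      = ((xs.map (fun p => (pvKey p, p))).foldl (fun (g : PySem.Dict Int (List (List Int))) q => g.modify q.1 [] (fun l => l ++ [q.2])) PySem.Dict.empty)
      from by rw [List.foldl_map]]
  rw [PySem.Dict.getD_foldl_modify_append]
  simp [List.filter_map, Function.comp_def]

theorem group_subbed_eq (xs : List (List Int)) :
    group_subbed_on_players_by_minute xs = group_subbed_on_players_by_minute_alt xs := by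
  unfold group_subbed_on_players_by_minute group_subbed_on_players_by_minute_alt
  rw [pv_foldA_eq_modify, pv_keys_fold]
  have hnd : (xs.foldl (fun (g : PySem.Dict Int (List (List Int))) p => g.modify (pvKey p) [] (fun l => l ++ [p])) PySem.Dict.empty).keys.Nodup := by
    apply PySem.Dict.nodup_keys_foldl_modify_key
    simp
  rw [PySem.Dict.items_eq_map_keys _ hnd []]
  rw [PySem.Dict.keys_foldl_modify_key]
  simp only [pv_getD_fold]
  simp [PySem.Set.update_nil_left]

-- ===== VERDICT (by name: the statement is the Claim_ definition above) =====
theorem group_subbed_on_players_by_minute_spec : Claim_equal_group_subbed_on_players_by_minute := by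
  intro xs _ _
  exact group_subbed_eq xs
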